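-- pv_equiv track=rewrite | github.com/pouyashaeri/LeetCode | CalendarPractice.py | map_month
-- ===== SOURCE A (Python) =====
-- def map_month(month):
--     month = int(month)
--     months = {1: "Jan", 2: "Feb", 3: "Mar", 4: "Apr",
--               5: "May", 6: "Jun", 7: "Jul", 8: "Aug",
--               9: "Sep", 10: "Oct", 11: "Nov", 12: "Dec"}
--     for m in months:
--         if m == month:
--             return months.get(m, "Not in Month Range")
-- ===== SOURCE B (Python) =====
-- NAMES = "JanFebMarAprMayJunJulAugSepOctNovDec"
--
-- def map_month(month):
--     m = int(month)
--     if 1 <= m <= 12: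
--         i = (m - 1) * 3
--         return NAMES[i:i + 3]
--     return None
-- ===== Notes on version B (the rewrite author's own statement) =====
-- stated objective: idiomatic
-- what changed: Replaces the dict built on every call and the linear scan over its keys with closed-form arithmetic slicing into one packed constant string of abbreviations, guarded by a 1..12 range check.
import Mathlib
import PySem

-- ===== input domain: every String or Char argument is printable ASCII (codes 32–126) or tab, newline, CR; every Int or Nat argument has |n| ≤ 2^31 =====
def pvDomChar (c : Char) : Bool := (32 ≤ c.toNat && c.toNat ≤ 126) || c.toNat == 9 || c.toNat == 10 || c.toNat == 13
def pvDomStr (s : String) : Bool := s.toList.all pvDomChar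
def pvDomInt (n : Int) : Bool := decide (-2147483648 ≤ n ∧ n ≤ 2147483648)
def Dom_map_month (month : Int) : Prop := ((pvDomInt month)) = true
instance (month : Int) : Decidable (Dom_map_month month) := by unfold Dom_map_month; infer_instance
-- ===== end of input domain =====

-- B replaces A's per-call dict and key scan with O(1) arithmetic slicing into one packed constant string of abbreviations (idiomatic).

-- ===== PORT A =====
-- the literal dict of A, as an insertion-ordered association list
def monthsA : PySem.Dict Int String :=
  PySem.Dict.ofList [(1, "Jan"), (2, "Feb"), (3, "Mar"), (4, "Apr"),
   (5, "May"), (6, "Jun"), (7, "Jul"), (8, "Aug"),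
   (9, "Sep"), (10, "Oct"), (11, "Nov"), (12, "Dec")]

-- the 'for m in months' loop: first key equal to month returns months.get(m, default); falling off returns None
def loopA (months : PySem.Dict Int String) (keys : List Int) (month : Int) : Option String :=
  match keys with
  | [] => none
  | m :: rest =>
    if m == month then some (PySem.Dict.getD months m "Not in Month Range")
    else loopA months rest month

def map_month (month : Int) : Option String :=
  loopA monthsA (PySem.Dict.keys monthsA) month

-- ===== PORT B =====
def namesB : String := "JanFebMarAprMayJunJulAugSepOctNovDec"

def map_month_alt (month : Int) : Option String :=
  if 1 ≤ month ∧ month ≤ 12 then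
    some (PySem.Str.slice namesB (some ((month - 1) * 3)) (some ((month - 1) * 3 + 3)))
  else none

-- ===== PRECONDITION & SPEC =====
def Spec_map_month (month : Int) (out : Option String) : Prop := out = map_month_alt month
instance (month : Int) (out : Option String) : Decidable (Spec_map_month month out) := by unfold Spec_map_month; infer_instance

-- ===== CLAIM (what is proved, stated in full; the proofs are below) =====
def Claim_equal_map_month : Prop := ∀ (month : Int), Dom_map_month month → Spec_map_month month (map_month month)

-- ===== LEMMAS AND PROOFS =====
theorem loopA_none (d : PySem.Dict Int String) (keys : List Int) (month : Int)
    (h : month ∉ keys) : loopA d keys month = none := by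
  induction keys with
  | nil => rfl
  | cons k rest ih =>
    simp only [List.mem_cons, not_or] at h
    simp only [loopA, beq_iff_eq, if_neg (Ne.symm h.1)]
    exact ih h.2

theorem agree_on (month : Int) : map_month month = map_month_alt month := by
  by_cases h : 1 ≤ month ∧ month ≤ 12
  · obtain ⟨h1, h2⟩ := h
    interval_cases month <;> rfl
  · have hA : map_month month = none := by
      have hk : PySem.Dict.keys monthsA = [1, 2, 3, 4, 5, 6, 7, 8, 9, 10, 11, 12] := by decide
      unfold map_month
      rw [hk]
      apply loopA_none
      simp only [List.mem_cons, List.not_mem_nil, or_false]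
      push Not
      omega
    have hB : map_month_alt month = none := by
      simp only [map_month_alt, if_neg h]
    rw [hA, hB]

-- ===== VERDICT (by name: the statement is the Claim_ definition above) =====
theorem map_month_spec : Claim_equal_map_month := by
  intro month _
  exact agree_on month
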